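-- pv_equiv track=rewrite | github.com/benganellison/adventofcode | 2024/22/part2_brute_force.py | generate_prices
-- ===== SOURCE A (Python) =====
-- MOD = 16777216
--
-- def mix(a, b):
--     return a ^ b
--
-- def prune(a):
--     return a % MOD
--
-- def calculate_next_secret(secret):
--     secret = mix(secret, secret * 64)
--     secret = prune(secret)
--     secret = mix(secret, int(secret / 32))
--     secret = prune(secret)
--     secret = mix(secret, secret * 2048)
--     secret = prune(secret)
--
--     return secret
--
-- def generate_prices(initial_secret):
--     prices = []
--     current_secret = initial_secret
--     prices.append(abs(current_secret) % 10)
--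
--     secrets = [current_secret]
--
--     price_changes = []
--     last_price = abs(current_secret) % 10
--     for _ in range(2000):
--         current_secret = calculate_next_secret(current_secret)
--         secrets.append(current_secret)
--         current_price = abs(current_secret) % 10
--         price_changes.append(current_price - last_price)
--         prices.append(current_price)
--         last_price = current_price
--
--     return prices, price_changes
-- ===== SOURCE B (Python) =====
-- MOD = 16777216
--
-- def _step(s):
--     s = (s ^ (s * 64)) % MOD
--     s = (s ^ (s // 32)) % MOD
--     s = (s ^ (s * 2048)) % MOD
--     return s
--
-- # The step is GF(2)-linear on the 24-bit state (xor, shifts and masking are bitwise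
-- # linear), so _step(s) = _T0[lo] ^ _T1[mid] ^ _T2[hi] for the byte split s = lo + 256*mid + 65536*hi.
-- _T0 = [_step(b) for b in range(256)]
-- _T1 = [_step(b * 256) for b in range(256)]
-- _T2 = [_step(b * 65536) for b in range(256)]
--
-- def generate_prices(initial_secret):
--     s = _step(initial_secret)
--     prices = [abs(initial_secret) % 10, s % 10]
--     for _ in range(1999):
--         s = _T0[s % 256] ^ _T1[s // 256 % 256] ^ _T2[s // 65536]
--         prices.append(s % 10)
--     price_changes = [q - p for p, q in zip(prices, prices[1:])]
--     return prices, price_changes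
-- ===== Notes on version B (the rewrite author's own statement) =====
-- stated objective: faster
-- what changed: B replaces A's per-step mix/prune arithmetic with a table-driven linear map: it precomputes three byte-indexed lookup tables exploiting the GF(2)-linearity of the xorshift step, so each iteration is three table lookups and two xors instead of two multiplications, a division and three mods; price changes come from zipping the prices list with its tail instead of a last_price accumulator.
import Mathlib
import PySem

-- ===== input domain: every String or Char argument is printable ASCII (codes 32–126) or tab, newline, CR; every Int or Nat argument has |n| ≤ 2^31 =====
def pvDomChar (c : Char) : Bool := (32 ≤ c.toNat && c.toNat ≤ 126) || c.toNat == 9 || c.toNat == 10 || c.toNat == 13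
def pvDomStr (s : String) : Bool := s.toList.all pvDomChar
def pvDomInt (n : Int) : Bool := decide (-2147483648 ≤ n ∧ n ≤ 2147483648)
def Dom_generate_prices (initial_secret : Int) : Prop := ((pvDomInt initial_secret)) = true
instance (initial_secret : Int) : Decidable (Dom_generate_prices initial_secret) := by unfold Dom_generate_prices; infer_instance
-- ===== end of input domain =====

-- B replaces A's per-step mix/prune arithmetic with three precomputed 256-entry lookup
-- tables (valid by GF(2)-linearity of the xorshift step on the 24-bit state) and derives
-- price_changes by zipping the prices list with its tail (objective: faster, constant factor).

-- ===== PORT A =====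
-- calculate_next_secret (mix/prune inlined as in A, step for step).
-- int(secret/32): ported as floor division — exact here because its argument is freshly
-- pruned (0 ≤ secret < 2^24), where float division by 32 is exact and int() truncation = floor.
def pvNextA (secret : Int) : Int :=
  let s1 := PySem.Int.mod (PySem.Int.bxor secret (secret * 64)) 16777216
  let s2 := PySem.Int.mod (PySem.Int.bxor s1 (PySem.Int.floordiv s1 32)) 16777216
  PySem.Int.mod (PySem.Int.bxor s2 (s2 * 2048)) 16777216

-- A's loop: state = (current_secret, secrets, prices, price_changes, last_price)
def pvLoopA : Nat → Int → List Int → List Int → List Int → Int → List Int × List Int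
  | 0, _, _, prices, changes, _ => (prices, changes)
  | n + 1, secret, secrets, prices, changes, last =>
      let s := pvNextA secret
      let p := PySem.Int.mod |s| 10
      pvLoopA n s (secrets ++ [s]) (prices ++ [p]) (changes ++ [p - last]) p

def generate_prices (initial_secret : Int) : List Int × List Int :=
  let p0 := PySem.Int.mod |initial_secret| 10
  pvLoopA 2000 initial_secret [initial_secret] [p0] [] p0

-- ===== PORT B =====
-- Source B's _step (same three mix/prune lines, // ported as floordiv — exact as for A above)
def pvStepB (s : Int) : Int :=
  let s1 := PySem.Int.mod (PySem.Int.bxor s (s * 64)) 16777216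
  let s2 := PySem.Int.mod (PySem.Int.bxor s1 (PySem.Int.floordiv s1 32)) 16777216
  PySem.Int.mod (PySem.Int.bxor s2 (s2 * 2048)) 16777216

-- the module-level tables _T0/_T1/_T2 = [_step(b * 256^i) for b in range(256)]
def pvT0 : List Int := (PySem.List.pyRange 0 256 1).map (fun b => pvStepB b)
def pvT1 : List Int := (PySem.List.pyRange 0 256 1).map (fun b => pvStepB (b * 256))
def pvT2 : List Int := (PySem.List.pyRange 0 256 1).map (fun b => pvStepB (b * 65536))

-- s = _T0[s % 256] ^ _T1[s // 256 % 256] ^ _T2[s // 65536]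
-- (list indexing ported with pyGetD: the indices are always in range 0..255 here)
def pvTableStep (s : Int) : Int :=
  PySem.Int.bxor
    (PySem.Int.bxor (PySem.List.pyGetD pvT0 (PySem.Int.mod s 256) 0)
      (PySem.List.pyGetD pvT1 (PySem.Int.mod (PySem.Int.floordiv s 256) 256) 0))
    (PySem.List.pyGetD pvT2 (PySem.Int.floordiv s 65536) 0)

-- B's loop: advance by table lookups, append s % 10
def pvLoopB : Nat → Int → List Int → List Int
  | 0, _, prices => prices
  | n + 1, s, prices =>
      let s' := pvTableStep s
      pvLoopB n s' (prices ++ [PySem.Int.mod s' 10])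

def generate_prices_alt (initial_secret : Int) : List Int × List Int :=
  let s := pvStepB initial_secret
  let prices := pvLoopB 1999 s [PySem.Int.mod |initial_secret| 10, PySem.Int.mod s 10]
  -- [q - p for p, q in zip(prices, prices[1:])]
  let price_changes := (prices.zip (PySem.List.slice prices (some 1) none)).map
      (fun pq => pq.2 - pq.1)
  (prices, price_changes)

-- ===== PRECONDITION & SPEC =====
def Spec_generate_prices (initial_secret : Int) (out : List Int × List Int) : Prop := out = generate_prices_alt initial_secret
instance (initial_secret : Int) (out : List Int × List Int) : Decidable (Spec_generate_prices initial_secret out) := by unfold Spec_generate_prices; infer_instance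

-- ===== CLAIM (what is proved, stated in full; the proofs are below) =====
def Claim_equal_generate_prices : Prop := ∀ (initial_secret : Int), Dom_generate_prices initial_secret → Spec_generate_prices initial_secret (generate_prices initial_secret)

-- ===== LEMMAS AND PROOFS =====

-- Nat version of the xorshift step, for the linear-algebra argument
def nStep (s : Nat) : Nat :=
  let s1 := (s ^^^ s * 64) % 16777216
  let s2 := (s1 ^^^ s1 / 32) % 16777216
  (s2 ^^^ s2 * 2048) % 16777216

theorem mul_pow_xor (a b : Nat) (k : Nat) : (a ^^^ b) * 2^k = a * 2^k ^^^ b * 2^k := by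
  simpa [Nat.shiftLeft_eq] using Nat.shiftLeft_xor_distrib (a := a) (b := b) (i := k)

theorem div_pow_xor (a b : Nat) (k : Nat) : (a ^^^ b) / 2^k = a / 2^k ^^^ b / 2^k := by
  simpa [Nat.shiftRight_eq_div_pow] using Nat.shiftRight_xor_distrib (a := a) (b := b) (i := k)

theorem stage_xor (f : Nat → Nat) (hf : ∀ a b, f (a ^^^ b) = f a ^^^ f b) (a b : Nat) :
    ((a ^^^ b) ^^^ f (a ^^^ b)) % 16777216 = ((a ^^^ f a) % 16777216) ^^^ ((b ^^^ f b) % 16777216) := by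
  have h : (16777216 : Nat) = 2 ^ 24 := by norm_num
  rw [h, ← Nat.xor_mod_two_pow, hf]
  congr 1
  simp [Nat.xor_comm, Nat.xor_left_comm]

-- GF(2)-linearity of the full step
theorem nStep_xor (a b : Nat) : nStep (a ^^^ b) = nStep a ^^^ nStep b := by
  show ((((a ^^^ b) ^^^ (a ^^^ b) * 64) % 16777216 ^^^ _) % 16777216 ^^^ _) % 16777216 = _
  rw [stage_xor (f := (· * 64)) (fun x y => by simpa using mul_pow_xor x y 6) a b]
  rw [stage_xor (f := (· / 32)) (fun x y => by simpa using div_pow_xor x y 5)]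
  rw [stage_xor (f := (· * 2048)) (fun x y => by simpa using mul_pow_xor x y 11)]
  rfl

-- any Nat is the xor of its three byte slices
theorem byte_split (s : Nat) :
    s % 256 ^^^ (s / 256 % 256 * 256 ^^^ s / 65536 * 65536) = s := by
  apply Nat.eq_of_testBit_eq
  intro i
  have h8 : (256 : Nat) = 2^8 := by norm_num
  have h16 : (65536 : Nat) = 2^16 := by norm_num
  rw [h8, h16, ← Nat.shiftLeft_eq, ← Nat.shiftLeft_eq, ← Nat.shiftRight_eq_div_pow, ← Nat.shiftRight_eq_div_pow]
  simp only [Nat.testBit_xor, Nat.testBit_mod_two_pow, Nat.testBit_shiftLeft, Nat.testBit_shiftRight]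
  by_cases h1 : i < 8
  · simp [h1, show ¬ 8 ≤ i by omega, show ¬ 16 ≤ i by omega]
  · by_cases h2 : i < 16
    · have e : 8 + (i - 8) = i := by omega
      simp [h1, e, show 8 ≤ i by omega, show i - 8 < 8 by omega, show ¬ 16 ≤ i by omega]
    · have e : 16 + (i - 16) = i := by omega
      simp [h1, e, show 16 ≤ i by omega, show ¬ i - 8 < 8 by omega]

theorem hM_cast : (16777216 : Int) = ((16777216 : Nat) : Int) := by norm_num
theorem stage_mul_cast (m : Nat) (c : Nat) :
    PySem.Int.mod (PySem.Int.bxor (m : Int) ((m : Int) * (c : Nat))) 16777216 = (((m ^^^ m * c) % 16777216 : Nat) : Int) := by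
  rw [hM_cast, show ((m:Int) * (c:Nat)) = ((m * c : Nat) : Int) by push_cast; ring,
      PySem.Int.bxor_natCast, PySem.Int.mod_natCast]
theorem stage_div_cast (m : Nat) :
    PySem.Int.mod (PySem.Int.bxor (m : Int) (PySem.Int.floordiv (m : Int) 32)) 16777216 = (((m ^^^ m / 32) % 16777216 : Nat) : Int) := by
  rw [hM_cast, show ((32:Int)) = ((32:Nat):Int) by norm_num,
      PySem.Int.floordiv_natCast, PySem.Int.bxor_natCast, PySem.Int.mod_natCast]
theorem stepB_natCast (n : Nat) : pvStepB (n : Int) = ((nStep n : Nat) : Int) := by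
  show PySem.Int.mod _ _ = _
  rw [show ((64:Int)) = ((64:Nat):Int) by norm_num]
  rw [stage_mul_cast n 64, stage_div_cast, show ((2048:Int)) = ((2048:Nat):Int) by norm_num, stage_mul_cast]
  rfl

-- the step only ever produces canonical 24-bit values
theorem nextA_nonneg (s : Int) : 0 ≤ pvNextA s := PySem.Int.mod_nonneg _ (by norm_num)
theorem nextA_lt (s : Int) : pvNextA s < 16777216 := PySem.Int.mod_lt _ (by norm_num)
theorem stepB_eq_nextA : pvStepB = pvNextA := rfl

-- table lookup = direct step, on canonical 24-bit states
theorem tableStep_eq (s : Int) (h0 : 0 ≤ s) (h1 : s < 16777216) : pvTableStep s = pvStepB s := by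
  obtain ⟨m, rfl⟩ : ∃ m : Nat, s = (m : Int) := ⟨s.toNat, (Int.toNat_of_nonneg h0).symm⟩
  have hm : m < 16777216 := by exact_mod_cast h1
  unfold pvTableStep pvT0 pvT1 pvT2
  rw [show ((256:Int)) = ((256:Nat):Int) by norm_num,
      show ((65536:Int)) = ((65536:Nat):Int) by norm_num,
      PySem.Int.mod_natCast, PySem.Int.floordiv_natCast, PySem.Int.mod_natCast,
      PySem.Int.floordiv_natCast]
  rw [PySem.List.pyGetD_map_pyRange_of_nonneg _ _ _ _ (by positivity) (by exact_mod_cast Nat.mod_lt _ (by norm_num))]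
  rw [PySem.List.pyGetD_map_pyRange_of_nonneg _ _ _ _ (by positivity) (by exact_mod_cast Nat.mod_lt _ (by norm_num))]
  rw [PySem.List.pyGetD_map_pyRange_of_nonneg _ _ _ _ (by positivity) (by exact_mod_cast (by omega : m / 65536 < 256))]
  rw [show ((m / 256 % 256 : Nat) : Int) * ((256:Nat):Int) = ((m / 256 % 256 * 256 : Nat) : Int) by push_cast; ring,
      show ((m / 65536 : Nat) : Int) * ((65536:Nat):Int) = ((m / 65536 * 65536 : Nat) : Int) by push_cast; ring]
  rw [stepB_natCast, stepB_natCast, stepB_natCast, stepB_natCast,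
      PySem.Int.bxor_natCast, PySem.Int.bxor_natCast]
  congr 1
  rw [← nStep_xor, ← nStep_xor]
  rw [show (m % 256 ^^^ m / 256 % 256 * 256) ^^^ m / 65536 * 65536 = m from by
        rw [Nat.xor_assoc]; exact byte_split m]


-- the stream of the next n prices from a secret
def pvPricesFrom : Nat → Int → List Int
  | 0, _ => []
  | n + 1, s =>
      let s' := pvNextA s
      PySem.Int.mod |s'| 10 :: pvPricesFrom n s'

-- adjacent differences of (last :: rest)
def pvDiffs : Int → List Int → List Int
  | _, [] => []
  | last, p :: ps => (p - last) :: pvDiffs p ps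

theorem mod10_abs (s : Int) (h : 0 ≤ s) : PySem.Int.mod |s| 10 = PySem.Int.mod s 10 := by
  rw [abs_of_nonneg h]

theorem pvLoopA_eq (n : Nat) : ∀ (s : Int) (secrets prices changes : List Int) (last : Int),
    pvLoopA n s secrets prices changes last
      = (prices ++ pvPricesFrom n s, changes ++ pvDiffs last (pvPricesFrom n s)) := by
  induction n with
  | zero => intro s secrets prices changes last; simp [pvLoopA, pvPricesFrom, pvDiffs]
  | succ n ih =>
      intro s secrets prices changes last
      simp only [pvLoopA, pvPricesFrom, pvDiffs, ih, List.append_assoc, List.singleton_append]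

theorem pvLoopB_eq (n : Nat) : ∀ (s : Int) (prices : List Int), 0 ≤ s → s < 16777216 →
    pvLoopB n s prices = prices ++ pvPricesFrom n s := by
  induction n with
  | zero => intro s prices _ _; simp [pvLoopB, pvPricesFrom]
  | succ n ih =>
      intro s prices h0 h1
      show pvLoopB n (pvTableStep s) (prices ++ [PySem.Int.mod (pvTableStep s) 10]) = _
      rw [tableStep_eq s h0 h1, stepB_eq_nextA,
          ih (pvNextA s) _ (nextA_nonneg s) (nextA_lt s)]
      show _ = prices ++ (PySem.Int.mod |pvNextA s| 10 :: pvPricesFrom n (pvNextA s))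
      rw [mod10_abs _ (nextA_nonneg s)]
      simp

theorem zip_tail_diffs (rest : List Int) : ∀ last : Int,
    ((last :: rest).zip rest).map (fun pq => pq.2 - pq.1) = pvDiffs last rest := by
  induction rest with
  | nil => intro last; rfl
  | cons p ps ih =>
      intro last
      simp only [List.zip_cons_cons, List.map_cons, pvDiffs]
      exact congrArg _ (ih p)

theorem pricesFrom_2000 (s : Int) :
    pvPricesFrom 2000 s = PySem.Int.mod (pvNextA s) 10 :: pvPricesFrom 1999 (pvNextA s) := by
  show PySem.Int.mod |pvNextA s| 10 :: _ = _
  rw [mod10_abs _ (nextA_nonneg s)]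

-- ===== VERDICT (by name: the statement is the Claim_ definition above) =====
theorem generate_prices_spec : Claim_equal_generate_prices := by
  intro s _
  unfold Spec_generate_prices
  show pvLoopA 2000 s [s] [PySem.Int.mod |s| 10] [] (PySem.Int.mod |s| 10) = _
  rw [pvLoopA_eq]
  simp only [generate_prices_alt, stepB_eq_nextA]
  rw [pvLoopB_eq 1999 (pvNextA s) _ (nextA_nonneg s) (nextA_lt s)]
  rw [PySem.List.slice_from_one]
  show _ = (PySem.Int.mod |s| 10 :: PySem.Int.mod (pvNextA s) 10 :: pvPricesFrom 1999 (pvNextA s),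
      ((PySem.Int.mod |s| 10 :: PySem.Int.mod (pvNextA s) 10 :: pvPricesFrom 1999 (pvNextA s)).zip
        (PySem.Int.mod (pvNextA s) 10 :: pvPricesFrom 1999 (pvNextA s))).map (fun pq => pq.2 - pq.1))
  rw [zip_tail_diffs, pricesFrom_2000, List.nil_append, List.singleton_append]
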